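-- pv_equiv track=rewrite | github.com/hideaki-t/gomoku-py | build.py | morpdict_tolist
-- ===== SOURCE A (Python) =====
-- import itertools
--
-- def morpdict_tolist(morps):
--     def lowcost_cut_filter(idcost_pair):
--         # order by pos-id and keep the highest cost
--         return [next(v) for k, v in itertools.groupby(
--             sorted(idcost_pair, reverse=True), key=lambda x: x[0])]
--
--     morplist = [None] * len(morps)
--     for morpid, vs in morps.items():
--         morplist[morpid] = lowcost_cut_filter(vs)
--     return morplist
-- ===== SOURCE B (Python) =====
-- def morpdict_tolist(morps):
--     morplist = [None] * len(morps)
--     for morpid, vs in morps.items():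
--         best = {}
--         for p in vs:
--             cur = best.get(p[0])
--             if cur is None or cur < p:
--                 best[p[0]] = p
--         morplist[morpid] = [best[i] for i in sorted(best, reverse=True)]
--     return morplist
-- ===== Notes on version B (the rewrite author's own statement) =====
-- stated objective: alternative
-- what changed: Per entry, the sort of all (id,cost) pairs followed by itertools.groupby run-scanning is replaced by one dict-building pass keeping the lexicographic max pair per id, then sorting only the distinct ids descending.
import Mathlib
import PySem

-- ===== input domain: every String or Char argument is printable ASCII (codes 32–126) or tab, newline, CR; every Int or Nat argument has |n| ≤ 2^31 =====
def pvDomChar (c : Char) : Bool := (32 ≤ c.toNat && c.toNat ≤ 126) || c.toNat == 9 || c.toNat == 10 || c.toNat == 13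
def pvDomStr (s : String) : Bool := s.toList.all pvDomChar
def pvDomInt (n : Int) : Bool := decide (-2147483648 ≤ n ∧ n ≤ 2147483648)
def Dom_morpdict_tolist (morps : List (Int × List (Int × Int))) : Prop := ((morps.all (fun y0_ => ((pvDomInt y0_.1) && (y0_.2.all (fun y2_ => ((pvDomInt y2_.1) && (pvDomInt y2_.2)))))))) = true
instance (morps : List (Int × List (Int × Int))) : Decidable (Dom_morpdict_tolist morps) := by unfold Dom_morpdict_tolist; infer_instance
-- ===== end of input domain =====

-- B replaces per-entry sort+groupby by a dict of per-id lexicographic maxima plus a sort of the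
-- distinct ids only (objective: alternative; same result, proved below).

-- ===== PORT A =====
-- itertools.groupby(S, key=x[0]) with [next(v) for ...]: first element of each maximal
-- run of equal first components (hand-ported; exact for consecutive grouping).
def pvGroupFirsts : List (Int × Int) → List (Int × Int)
  | [] => []
  | x :: xs => x :: pvGroupFirsts (xs.dropWhile (fun y => y.1 == x.1))
  termination_by l => l.length
  decreasing_by simpa using Nat.lt_succ_of_le (List.length_dropWhile_le _ _)

-- sorted(idcost_pair, reverse=True) sorts pairs by Python's lexicographic tuple order:
-- PySem.List.sorted2 with keys fst, snd.
def pvLowcostCutFilter (idcost_pair : List (Int × Int)) : List (Int × Int) :=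
  pvGroupFirsts (PySem.List.sorted2 idcost_pair Prod.fst Prod.snd true)

def morpdict_tolist (morps : List (Int × List (Int × Int))) : List (Option (List (Int × Int))) :=
  (PySem.Dict.ofList morps).items.foldl
    (fun morplist kv => PySem.List.pySetD morplist kv.1 (some (pvLowcostCutFilter kv.2)))
    (List.replicate (PySem.Dict.ofList morps).size none)

-- ===== PORT B =====
-- Python tuple comparison cur < p on int pairs.
def pvPairLt (a b : Int × Int) : Bool := a.1 < b.1 || (a.1 == b.1 && a.2 < b.2)

-- 'cur = best.get(p[0]); if cur is None or cur < p: best[p[0]] = p'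
def pvBestStep (best : PySem.Dict Int (Int × Int)) (p : Int × Int) : PySem.Dict Int (Int × Int) :=
  match best.get? p.1 with
  | none => best.insert p.1 p
  | some cur => if pvPairLt cur p then best.insert p.1 p else best

def pvBest (vs : List (Int × Int)) : PySem.Dict Int (Int × Int) :=
  vs.foldl pvBestStep PySem.Dict.empty

-- '[best[i] for i in sorted(best, reverse=True)]'; i is always a key of best, so the
-- getD default (0, 0) is never used.
def pvBestList (vs : List (Int × Int)) : List (Int × Int) :=
  (PySem.List.sorted (pvBest vs).keys (fun k => k) true).map (fun k => (pvBest vs).getD k (0, 0))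

def morpdict_tolist_alt (morps : List (Int × List (Int × Int))) : List (Option (List (Int × Int))) :=
  (PySem.Dict.ofList morps).items.foldl
    (fun morplist kv => PySem.List.pySetD morplist kv.1 (some (pvBestList kv.2)))
    (List.replicate (PySem.Dict.ofList morps).size none)

-- ===== PRECONDITION & SPEC =====
-- A raises IndexError iff some key of the dict is outside [-n, n) where n is the number of
-- distinct keys; Pre_ excludes exactly those inputs (Python's negative indices wrap, so
-- negative in-range keys are admitted).
def Pre_morpdict_tolist (morps : List (Int × List (Int × Int))) : Prop :=
  ∀ k ∈ morps.map Prod.fst,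
    PySem.Raise.InRange (PySem.List.dedup (morps.map Prod.fst)).length k
instance (morps : List (Int × List (Int × Int))) : Decidable (Pre_morpdict_tolist morps) := by
  unfold Pre_morpdict_tolist; infer_instance

def pvWitness_morpdict_tolist : (List (Int × List (Int × Int))) :=
  [(0, [(1, 2), (1, 3), (2, 0)]), (1, [])]

def Spec_morpdict_tolist (morps : List (Int × List (Int × Int))) (out : List (Option (List (Int × Int)))) : Prop := out = morpdict_tolist_alt morps
instance (morps : List (Int × List (Int × Int))) (out : List (Option (List (Int × Int)))) : Decidable (Spec_morpdict_tolist morps out) := by unfold Spec_morpdict_tolist; infer_instance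

-- ===== CLAIM (what is proved, stated in full; the proofs are below) =====
def Claim_equal_morpdict_tolist : Prop := ∀ (morps : List (Int × List (Int × Int))), Dom_morpdict_tolist morps → Pre_morpdict_tolist morps → Spec_morpdict_tolist morps (morpdict_tolist morps)

-- ===== LEMMAS AND PROOFS =====

-- Python's reverse tuple sort is the reverse sort under the lexicographic linear order.
theorem pv_sorted2_eq_sorted_lex (xs : List (Int × Int)) :
    PySem.List.sorted2 xs Prod.fst Prod.snd true
      = PySem.List.sorted xs (fun p => (toLex p : Lex (Int × Int))) true := by
  have hb : (fun a b : Int × Int =>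
        decide (b.1 < a.1) || (!decide (a.1 < b.1) && decide (b.2 < a.2)))
      = (fun a b : Int × Int => decide ((toLex b : Lex (Int × Int)) < toLex a)) := by
    funext a b
    rw [Bool.eq_iff_iff]
    simp only [Bool.or_eq_true, Bool.and_eq_true, Bool.not_eq_eq_eq_not, Bool.not_true,
      decide_eq_true_eq, decide_eq_false_iff_not, Prod.Lex.lt_iff, ofLex_toLex]
    omega
  have hb2 : (fun a b : Int × Int =>
        decide (a.1 < b.1) || (!decide (b.1 < a.1) && decide (a.2 < b.2)))
      = (fun a b : Int × Int => decide ((toLex a : Lex (Int × Int)) < toLex b)) := by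
    funext a b
    rw [Bool.eq_iff_iff]
    simp only [Bool.or_eq_true, Bool.and_eq_true, Bool.not_eq_eq_eq_not, Bool.not_true,
      decide_eq_true_eq, decide_eq_false_iff_not, Prod.Lex.lt_iff, ofLex_toLex]
    omega
  simp only [PySem.List.sorted2, PySem.List.sorted, hb, hb2]

theorem pv_pairLt_iff (a b : Int × Int) :
    pvPairLt a b = true ↔ (toLex a : Lex (Int × Int)) < toLex b := by
  simp [pvPairLt, Prod.Lex.lt_iff]

theorem pv_fst_le_of_lex_le {a b : Int × Int}
    (h : (toLex a : Lex (Int × Int)) ≤ toLex b) : a.1 ≤ b.1 := by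
  rcases Prod.Lex.le_iff.mp h with h' | h' <;> simp only [ofLex_toLex] at h' <;> omega

theorem pv_dropWhile_head_false {α : Type} (q : α → Bool) :
    ∀ (l : List α) (h : α) (t : List α), l.dropWhile q = h :: t → q h = false := by
  intro l
  induction l with
  | nil => intro h t he; simp [List.dropWhile] at he
  | cons a l ih =>
    intro h t he
    by_cases hq : q a
    · rw [List.dropWhile_cons_of_pos hq] at he; exact ih h t he
    · rw [List.dropWhile_cons_of_neg hq] at he
      cases he; simpa using hq

-- The grouped scan on a descending-sorted list: strictly decreasing ids, same id set,
-- and each kept pair dominates every same-id element.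
theorem pv_groupFirsts_facts : ∀ (S : List (Int × Int)),
    S.Pairwise (fun a b => (toLex b : Lex (Int × Int)) ≤ toLex a) →
      ((pvGroupFirsts S).map Prod.fst).Pairwise (fun a b => b < a)
      ∧ (∀ k : Int, k ∈ (pvGroupFirsts S).map Prod.fst ↔ k ∈ S.map Prod.fst)
      ∧ (∀ x ∈ pvGroupFirsts S, ∀ y ∈ S, y.1 = x.1 → (toLex y : Lex (Int × Int)) ≤ toLex x)
      ∧ (∀ x ∈ pvGroupFirsts S, x ∈ S) := by
  intro S
  induction S using pvGroupFirsts.induct with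
  | case1 => intro _; simp [pvGroupFirsts]
  | case2 x xs ih =>
    intro hp
    obtain ⟨hx, hxs⟩ := List.pairwise_cons.mp hp
    have hGF : pvGroupFirsts (x :: xs)
        = x :: pvGroupFirsts (xs.dropWhile (fun y => y.1 == x.1)) := by
      rw [pvGroupFirsts]
    have hDsub : (xs.dropWhile (fun y => y.1 == x.1)).Sublist xs :=
      List.dropWhile_sublist _
    have hpD : (xs.dropWhile (fun y => y.1 == x.1)).Pairwise
        (fun a b => (toLex b : Lex (Int × Int)) ≤ toLex a) :=
      List.Pairwise.sublist (List.dropWhile_sublist _) hxs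
    obtain ⟨ih1, ih2, ih3, ih4⟩ := ih hpD
    have hT : ∀ y ∈ xs.takeWhile (fun y => y.1 == x.1), y.1 = x.1 := by
      intro y hy
      have := List.mem_takeWhile_imp hy
      simpa using this
    have hDlt : ∀ z ∈ xs.dropWhile (fun y => y.1 == x.1), z.1 < x.1 := by
      intro z hz
      cases hD : xs.dropWhile (fun y => y.1 == x.1) with
      | nil => rw [hD] at hz; cases hz
      | cons h t =>
        have hh1 : h.1 ≠ x.1 := by
          have := pv_dropWhile_head_false (fun y => y.1 == x.1) xs h t hD
          simpa using this
        have hhx : (toLex h : Lex (Int × Int)) ≤ toLex x :=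
          hx h (hDsub.subset (by rw [hD]; exact List.mem_cons_self ..))
        have hh1lt : h.1 < x.1 := lt_of_le_of_ne (pv_fst_le_of_lex_le hhx) hh1
        rw [hD] at hz
        rcases List.mem_cons.mp hz with rfl | hzt
        · exact hh1lt
        · have hrel : (toLex z : Lex (Int × Int)) ≤ toLex h := by
            rw [hD] at hpD
            exact (List.pairwise_cons.mp hpD).1 z hzt
          exact lt_of_le_of_lt (pv_fst_le_of_lex_le hrel) hh1lt
    refine ⟨?_, ?_, ?_, ?_⟩
    · rw [hGF, List.map_cons, List.pairwise_cons]
      refine ⟨?_, ih1⟩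
      intro k hk
      obtain ⟨x', hx', rfl⟩ := List.mem_map.mp hk
      exact hDlt x' (ih4 x' hx')
    · intro k
      rw [hGF]
      simp only [List.map_cons, List.mem_cons, ih2]
      constructor
      · rintro (rfl | hk)
        · left; rfl
        · right
          obtain ⟨y, hy, rfl⟩ := List.mem_map.mp hk
          exact List.mem_map_of_mem (hDsub.subset hy)
      · rintro (rfl | hk)
        · left; rfl
        · obtain ⟨y, hy, rfl⟩ := List.mem_map.mp hk
          rw [← List.takeWhile_append_dropWhile (p := fun y => y.1 == x.1) (l := xs)]
            at hy
          rcases List.mem_append.mp hy with hyT | hyD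
          · left; exact hT y hyT
          · right; exact List.mem_map_of_mem hyD
    · intro x' hx' y hy hyk
      rw [hGF] at hx'
      rcases List.mem_cons.mp hx' with rfl | hx'G
      · rcases List.mem_cons.mp hy with rfl | hyxs
        · exact le_refl _
        · exact hx y hyxs
      · have hx'D : x' ∈ xs.dropWhile (fun y => y.1 == x.1) := ih4 x' hx'G
        have hx'lt : x'.1 < x.1 := hDlt x' hx'D
        rcases List.mem_cons.mp hy with rfl | hyxs
        · omega
        · rw [← List.takeWhile_append_dropWhile (p := fun y => y.1 == x.1) (l := xs)]
            at hyxs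
          rcases List.mem_append.mp hyxs with hyT | hyD
          · exact absurd (hT y hyT) (by omega)
          · exact ih3 x' hx'G y hyD hyk
    · intro x' hx'
      rw [hGF] at hx'
      rcases List.mem_cons.mp hx' with rfl | hx'G
      · exact List.mem_cons_self ..
      · exact List.mem_cons_of_mem _ (hDsub.subset (ih4 x' hx'G))

theorem pv_step_get?_ne (d : PySem.Dict Int (Int × Int)) (p : Int × Int) {k : Int}
    (hne : k ≠ p.1) : (pvBestStep d p).get? k = d.get? k := by
  cases hg : d.get? p.1 with
  | none =>
    simp only [pvBestStep, hg]
    exact PySem.Dict.get?_insert_of_ne d p hne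
  | some cur =>
    simp only [pvBestStep, hg]
    split_ifs
    · exact PySem.Dict.get?_insert_of_ne d p hne
    · rfl

theorem pv_step_keys_mem (d : PySem.Dict Int (Int × Int)) (p : Int × Int) (k : Int) :
    k ∈ (pvBestStep d p).keys ↔ k = p.1 ∨ k ∈ d.keys := by
  cases hg : d.get? p.1 with
  | none =>
    simp only [pvBestStep, hg]
    exact PySem.Dict.mem_keys_insert d p.1 k p
  | some cur =>
    have hmem : p.1 ∈ d.keys := by
      by_contra hn
      rw [(PySem.Dict.get?_eq_none_iff_not_mem_keys d p.1).mpr hn] at hg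
      cases hg
    simp only [pvBestStep, hg]
    split_ifs
    · exact PySem.Dict.mem_keys_insert d p.1 k p
    · constructor
      · intro h; right; exact h
      · rintro (rfl | h)
        · exact hmem
        · exact h

theorem pv_best_keys_nodup : ∀ (vs : List (Int × Int)) (d : PySem.Dict Int (Int × Int)),
    d.keys.Nodup → (vs.foldl pvBestStep d).keys.Nodup := by
  intro vs
  induction vs with
  | nil => intro d h; simpa using h
  | cons p rest ih =>
    intro d h
    rw [List.foldl_cons]
    apply ih
    cases hg : d.get? p.1 with
    | none =>
      simp only [pvBestStep, hg]
      exact PySem.Dict.nodup_keys_insert d p.1 p h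
    | some cur =>
      simp only [pvBestStep, hg]
      split_ifs
      · exact PySem.Dict.nodup_keys_insert d p.1 p h
      · exact h

theorem pv_best_keys_mem : ∀ (vs : List (Int × Int)) (d : PySem.Dict Int (Int × Int)) (k : Int),
    k ∈ (vs.foldl pvBestStep d).keys ↔ (k ∈ d.keys ∨ k ∈ vs.map Prod.fst) := by
  intro vs
  induction vs with
  | nil => intro d k; simp
  | cons p rest ih =>
    intro d k
    rw [List.foldl_cons, ih, pv_step_keys_mem]
    simp only [List.map_cons, List.mem_cons]
    tauto

theorem pv_best_get?_spec : ∀ (vs : List (Int × Int)) (d : PySem.Dict Int (Int × Int))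
    (k : Int) (m : Int × Int), (vs.foldl pvBestStep d).get? k = some m →
      (∀ y ∈ vs, y.1 = k → (toLex y : Lex (Int × Int)) ≤ toLex m)
      ∧ (∀ m₀, d.get? k = some m₀ → (toLex m₀ : Lex (Int × Int)) ≤ toLex m)
      ∧ ((m ∈ vs ∧ m.1 = k) ∨ d.get? k = some m) := by
  intro vs
  induction vs with
  | nil =>
    intro d k m h
    rw [List.foldl_nil] at h
    refine ⟨by simp, ?_, Or.inr h⟩
    intro m₀ h₀
    rw [h] at h₀
    cases h₀
    exact le_refl _
  | cons p rest ih =>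
    intro d k m h
    rw [List.foldl_cons] at h
    obtain ⟨ih1, ih2, ih3⟩ := ih (pvBestStep d p) k m h
    by_cases hk : p.1 = k
    · subst hk
      have hstep : ∀ q, (pvBestStep d p).get? p.1 = some q →
          (toLex q : Lex (Int × Int)) ≤ toLex m := ih2
      cases hg : d.get? p.1 with
      | none =>
        have hgetp : (pvBestStep d p).get? p.1 = some p := by
          simp only [pvBestStep, hg]
          exact PySem.Dict.get?_insert_self d p.1 p
        have hpm : (toLex p : Lex (Int × Int)) ≤ toLex m := hstep p hgetp
        refine ⟨?_, ?_, ?_⟩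
        · intro y hy hyk
          rcases List.mem_cons.mp hy with rfl | hyr
          · exact hpm
          · exact ih1 y hyr hyk
        · intro m₀ h₀; simp at h₀
        · rcases ih3 with ⟨hm, hmk⟩ | hsome
          · exact Or.inl ⟨List.mem_cons_of_mem _ hm, hmk⟩
          · rw [hgetp] at hsome
            cases hsome
            exact Or.inl ⟨List.mem_cons_self .., rfl⟩
      | some cur =>
        by_cases hlt : pvPairLt cur p = true
        · have hgetp : (pvBestStep d p).get? p.1 = some p := by
            simp only [pvBestStep, hg, if_pos hlt]
            exact PySem.Dict.get?_insert_self d p.1 p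
          have hpm : (toLex p : Lex (Int × Int)) ≤ toLex m := hstep p hgetp
          refine ⟨?_, ?_, ?_⟩
          · intro y hy hyk
            rcases List.mem_cons.mp hy with rfl | hyr
            · exact hpm
            · exact ih1 y hyr hyk
          · intro m₀ h₀
            injection h₀ with h₀e
            subst h₀e
            exact le_trans (le_of_lt ((pv_pairLt_iff _ _).mp hlt)) hpm
          · rcases ih3 with ⟨hm, hmk⟩ | hsome
            · exact Or.inl ⟨List.mem_cons_of_mem _ hm, hmk⟩
            · rw [hgetp] at hsome
              cases hsome
              exact Or.inl ⟨List.mem_cons_self .., rfl⟩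
        · have hstepd : pvBestStep d p = d := by
            simp only [pvBestStep, hg, if_neg hlt]
          have hgetc : (pvBestStep d p).get? p.1 = some cur := by rw [hstepd]; exact hg
          have hcm : (toLex cur : Lex (Int × Int)) ≤ toLex m := hstep cur hgetc
          have hpc : (toLex p : Lex (Int × Int)) ≤ toLex cur := by
            have := (not_iff_not.mpr (pv_pairLt_iff cur p)).mp hlt
            exact le_of_not_gt this
          refine ⟨?_, ?_, ?_⟩
          · intro y hy hyk
            rcases List.mem_cons.mp hy with rfl | hyr
            · exact le_trans hpc hcm
            · exact ih1 y hyr hyk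
          · intro m₀ h₀
            injection h₀ with h₀e
            subst h₀e
            exact hcm
          · rcases ih3 with ⟨hm, hmk⟩ | hsome
            · exact Or.inl ⟨List.mem_cons_of_mem _ hm, hmk⟩
            · rw [hstepd] at hsome
              right
              rw [← hg]
              exact hsome
    · have hne : k ≠ p.1 := fun h' => hk h'.symm
      have hsg := pv_step_get?_ne d p hne
      refine ⟨?_, ?_, ?_⟩
      · intro y hy hyk
        rcases List.mem_cons.mp hy with rfl | hyr
        · exact absurd hyk hk
        · exact ih1 y hyr hyk
      · intro m₀ h₀
        exact ih2 m₀ (by rw [hsg]; exact h₀)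
      · rcases ih3 with ⟨hm, hmk⟩ | hsome
        · exact Or.inl ⟨List.mem_cons_of_mem _ hm, hmk⟩
        · rw [hsg] at hsome
          exact Or.inr hsome

-- The heart of the claim: per-entry, sort+groupby equals the dict-of-maxima pass.
theorem pv_inner_eq : pvLowcostCutFilter = pvBestList := by
  funext vs
  unfold pvLowcostCutFilter pvBestList
  rw [pv_sorted2_eq_sorted_lex]
  have hperm : (PySem.List.sorted vs (fun p => (toLex p : Lex (Int × Int))) true).Perm vs :=
    PySem.List.sorted_perm vs _ true
  have hpw := PySem.List.sorted_pairwise_rev vs (fun p => (toLex p : Lex (Int × Int)))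
  obtain ⟨h1, h2, h3, h4⟩ := pv_groupFirsts_facts _ hpw
  set S := PySem.List.sorted vs (fun p => (toLex p : Lex (Int × Int))) true with hSdef
  have hnd : (pvBest vs).keys.Nodup := pv_best_keys_nodup vs _ PySem.Dict.nodup_keys_empty
  have hmemK : ∀ k : Int, k ∈ (pvBest vs).keys ↔ k ∈ vs.map Prod.fst := by
    intro k
    unfold pvBest
    rw [pv_best_keys_mem]
    simp [PySem.Dict.keys_empty]
  have hget : ∀ x ∈ pvGroupFirsts S, (pvBest vs).get? x.1 = some x := by
    intro x hx
    have hxvs : x ∈ vs := hperm.subset (h4 x hx)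
    have hkeys : x.1 ∈ (pvBest vs).keys := (hmemK x.1).mpr (List.mem_map_of_mem hxvs)
    obtain ⟨m, hm⟩ : ∃ m, (pvBest vs).get? x.1 = some m := by
      cases hg : (pvBest vs).get? x.1 with
      | none =>
        exact absurd hkeys ((PySem.Dict.get?_eq_none_iff_not_mem_keys _ _).mp hg)
      | some m => exact ⟨m, rfl⟩
    obtain ⟨c1, c2, c3⟩ := pv_best_get?_spec vs PySem.Dict.empty x.1 m hm
    have hmvs : m ∈ vs ∧ m.1 = x.1 := by
      rcases c3 with h | h
      · exact h
      · rw [PySem.Dict.get?_empty] at h; cases h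
    have hmx : (toLex m : Lex (Int × Int)) ≤ toLex x :=
      h3 x hx m (hperm.mem_iff.mpr hmvs.1) hmvs.2
    have hxm : (toLex x : Lex (Int × Int)) ≤ toLex m := c1 x hxvs rfl
    have hxe : x = m := toLex.injective (le_antisymm hxm hmx)
    rw [hm, hxe]
  have hndG : ((pvGroupFirsts S).map Prod.fst).Nodup :=
    List.Pairwise.imp (fun {a b} h => by omega) h1
  have hpermK : ((pvGroupFirsts S).map Prod.fst).Perm (pvBest vs).keys := by
    rw [List.perm_ext_iff_of_nodup hndG hnd]
    intro k
    rw [h2 k, hmemK, (hperm.map Prod.fst).mem_iff]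
  have hsortK : PySem.List.sorted (pvBest vs).keys (fun k => k) true
      = (pvGroupFirsts S).map Prod.fst :=
    PySem.List.sorted_rev_eq_of_perm_of_pairwise_gt _ _ _ hpermK h1
  rw [hsortK, List.map_map]
  have hcongr : ∀ x ∈ pvGroupFirsts S,
      ((fun k => (pvBest vs).getD k (0, 0)) ∘ Prod.fst) x = id x := by
    intro x hx
    exact PySem.Dict.getD_of_get?_eq_some (pvBest vs) (0, 0) (hget x hx)
  rw [List.map_congr_left hcongr, List.map_id]

-- ===== VERDICT (by name: the statement is the Claim_ definition above) =====
theorem morpdict_tolist_spec : Claim_equal_morpdict_tolist := by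
  intro morps _ _
  unfold Spec_morpdict_tolist morpdict_tolist morpdict_tolist_alt
  rw [pv_inner_eq]
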